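-- pv_equiv track=rewrite | github.com/znydd/BracuStuff | lab_4/Task6/task6.py | dimondCollector
-- ===== SOURCE A (Python) =====
-- def floodFill(row, col, rows, cols, trsr_map):
--     if row < 0 or row >= rows or col < 0 or col >= cols or trsr_map[row][col] == '#':       #The floodFill function takes the current
--         return 0                                                                       # position (row, col) and checks if it's a valid position
--     cnt = 0                                                                            #on the map and if the cell is unexplored (not '#').
--     if trsr_map[row][col] == 'D':
--         cnt+=1
--                                                                                 #If the current cell contains a diamond ('D'), it increments a counter (cnt)
--     trsr_map[row][col] = '#'                                                    #It marks the current cell as visited ('#') and recursively calls floodFill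
--                                                                                 #on all valid adjacent cells (up, down, left, right).
--     cnt += floodFill(row+1, col, rows, cols, trsr_map)
--     cnt += floodFill(row-1, col, rows, cols, trsr_map)
--     cnt += floodFill(row, col+1, rows, cols, trsr_map)
--     cnt += floodFill(row, col-1, rows, cols, trsr_map)
--                                                                                 #The recursion continues until all connected cells containing diamonds are explored
--     return cnt                                                                  # then the final count is returned.
--
-- def dimondCollector(trsr_map, rows, cols):
--     dimondMax = 0
--     for row in range(rows):
--         for col in range(cols):
--             if trsr_map[row][col] == ".":
--                 dimond = floodFill(row, col, rows, cols, trsr_map)     # Here we iterate every possible ways of finding dimond and take the max one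
--                 dimondMax = max(dimond, dimondMax)
--
--     return dimondMax
-- ===== SOURCE B (Python) =====
-- def dimondCollector(trsr_map, rows, cols):
--     dimondMax = 0
--     for row in range(rows):
--         for col in range(cols):
--             if trsr_map[row][col] == ".":
--                 # iterative flood fill: explicit stack, guard and mark at pop time
--                 stack = [(row, col)]
--                 cnt = 0
--                 while stack:
--                     r, c = stack.pop()
--                     if r < 0 or r >= rows or c < 0 or c >= cols or trsr_map[r][c] == '#':
--                         continue
--                     if trsr_map[r][c] == 'D':
--                         cnt += 1
--                     trsr_map[r][c] = '#'
--                     stack.extend([(r, c - 1), (r, c + 1), (r - 1, c), (r + 1, c)])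
--                 dimondMax = max(cnt, dimondMax)
--     return dimondMax
-- ===== Notes on version B (the rewrite author's own statement) =====
-- stated objective: alternative
-- what changed: The recursive floodFill is replaced by an iterative flood fill using an explicit stack with pop-time guarding and marking (no recursion, no call stack); the outer scan and max are kept.
import Mathlib
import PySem

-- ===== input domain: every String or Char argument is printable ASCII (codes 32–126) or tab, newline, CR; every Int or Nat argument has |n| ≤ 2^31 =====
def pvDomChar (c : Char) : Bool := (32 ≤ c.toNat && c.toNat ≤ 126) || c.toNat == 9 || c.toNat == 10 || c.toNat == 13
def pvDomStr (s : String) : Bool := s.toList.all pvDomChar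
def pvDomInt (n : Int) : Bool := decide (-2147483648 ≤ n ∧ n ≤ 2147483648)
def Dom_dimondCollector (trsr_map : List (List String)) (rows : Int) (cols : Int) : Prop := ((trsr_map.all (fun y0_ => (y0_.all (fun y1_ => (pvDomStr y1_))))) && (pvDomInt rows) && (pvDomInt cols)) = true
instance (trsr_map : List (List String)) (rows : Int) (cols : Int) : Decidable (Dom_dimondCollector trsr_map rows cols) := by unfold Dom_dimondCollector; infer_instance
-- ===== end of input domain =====

-- B replaces A's recursive flood fill by an explicit-stack iterative flood fill (pop-time guard
-- and marking); same outer scan, same result. Both Pythons mutate trsr_map in place identically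
-- (visited cells become '#'); the equivalence proved here is about the return value.

-- ===== PORT A =====
-- cell read trsr_map[r][c]: Pre_ guarantees in-range whenever Python reads; out-of-range
-- (Python IndexError, excluded by Pre_) yields "#" here, which both ports treat uniformly.
def getCell (g : List (List String)) (r c : Int) : String :=
  (((PySem.List.pyGet? g r).bind (fun rw => PySem.List.pyGet? rw c)).getD "#")

-- trsr_map[r][c] = '#' (both ports only call it with 0 ≤ r, 0 ≤ c in range)
def setCell (g : List (List String)) (r c : Int) : List (List String) :=
  g.set r.toNat ((g.getD r.toNat []).set c.toNat "#")

def rowCnt (rw : List String) : Nat := rw.countP (fun s => !(s == "#"))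

def nonHash (g : List (List String)) : Nat := (g.map rowCnt).sum

-- termination measure lemmas for both flood fills
theorem rowCnt_set_lt (rw : List String) (j : Nat) (hj : j < rw.length)
    (hv : rw[j] ≠ "#") : rowCnt (rw.set j "#") < rowCnt rw := by
  induction rw generalizing j with
  | nil => simp at hj
  | cons x xs ih =>
    cases j with
    | zero =>
      simp only [List.getElem_cons_zero] at hv
      simp [rowCnt, hv]
    | succ k =>
      simp only [List.getElem_cons_succ] at hv
      have := ih k (by simpa using hj) hv
      simp only [List.set_cons_succ, rowCnt, List.countP_cons] at *
      omega

theorem nonHash_set_lt (g : List (List String)) (i : Nat) (r' : List String)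
    (hi : i < g.length) (h : rowCnt r' < rowCnt g[i]) :
    nonHash (g.set i r') < nonHash g := by
  induction g generalizing i with
  | nil => simp at hi
  | cons x xs ih =>
    cases i with
    | zero => simp only [List.getElem_cons_zero] at h; simp [nonHash]; omega
    | succ k =>
      have := ih k (by simpa using hi) (by simpa using h)
      simp only [List.set_cons_succ, nonHash, List.map_cons, List.sum_cons] at *
      omega

theorem nonHash_setCell_lt (g : List (List String)) (r c : Int)
    (hr : 0 ≤ r) (hc : 0 ≤ c) (h : getCell g r c ≠ "#") :
    nonHash (setCell g r c) < nonHash g := by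
  unfold getCell at h
  rcases hgr : PySem.List.pyGet? g r with _ | rw0
  · rw [hgr] at h; simp at h
  rw [hgr] at h
  simp only [Option.bind_some] at h
  rcases hgc : PySem.List.pyGet? rw0 c with _ | v
  · rw [hgc] at h; simp at h
  rw [hgc] at h
  simp only [Option.getD_some] at h
  rw [PySem.List.pyGet?_of_nonneg g hr] at hgr
  rw [PySem.List.pyGet?_of_nonneg rw0 hc] at hgc
  have hri : r.toNat < g.length := by
    by_contra hx; rw [List.getElem?_eq_none (by omega)] at hgr; simp at hgr
  have hrw :  rw0 = g[r.toNat] := by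
    rw [List.getElem?_eq_getElem hri] at hgr; exact (Option.some.inj hgr).symm
  have hci : c.toNat < rw0.length := by
    by_contra hx; rw [List.getElem?_eq_none (by omega)] at hgc; simp at hgc
  have hv : rw0[c.toNat] = v := by
    rw [List.getElem?_eq_getElem hci] at hgc; exact Option.some.inj hgc
  unfold setCell
  have hgd : g.getD r.toNat [] = rw0 := by
    rw [List.getD_eq_getElem?_getD, List.getElem?_eq_getElem hri]; simp [hrw]
  rw [hgd]
  exact nonHash_set_lt g r.toNat (rw0.set c.toNat "#") hri
    (by rw [← hrw]; exact rowCnt_set_lt rw0 c.toNat hci (by rw [hv]; exact h))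

-- literal port of A's recursive floodFill; the Nat fuel is a pure totality guard:
-- floodFill below supplies fuel nonHash g + 1, which the recursion never exhausts
-- (each recursive call strictly reduces nonHash, see nonHash_setCell_lt).
def floodAuxF : Nat → Int → Int → Int → Int → List (List String) → Int × List (List String)
  | 0, _, _, _, _, g => (0, g)
  | f + 1, row, col, rows, cols, g =>
    if row < 0 ∨ rows ≤ row ∨ col < 0 ∨ cols ≤ col ∨ getCell g row col = "#" then (0, g)
    else
      let cnt0 : Int := if getCell g row col = "D" then 1 else 0
      let p1 := floodAuxF f (row + 1) col rows cols (setCell g row col)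
      let p2 := floodAuxF f (row - 1) col rows cols p1.2
      let p3 := floodAuxF f row (col + 1) rows cols p2.2
      let p4 := floodAuxF f row (col - 1) rows cols p3.2
      (cnt0 + p1.1 + p2.1 + p3.1 + p4.1, p4.2)

def floodFill (row col rows cols : Int) (g : List (List String)) :
    Int × List (List String) := floodAuxF (nonHash g + 1) row col rows cols g

def dimondCollector (trsr_map : List (List String)) (rows : Int) (cols : Int) : Int :=
  ((PySem.List.pyRange 0 rows 1).foldl (fun st row =>
    (PySem.List.pyRange 0 cols 1).foldl (fun st col =>
      if getCell st.2 row col = "." then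
        let p := floodFill row col rows cols st.2
        (max p.1 st.1, p.2)
      else st) st) ((0 : Int), trsr_map)).1

-- ===== PORT B =====
-- iterative flood fill: explicit stack (head = top), pop-time guard and pop-time marking
def floodLoop (rows cols : Int) (stack : List (Int × Int)) (cnt : Int)
    (g : List (List String)) : Int × List (List String) :=
  match stack with
  | [] => (cnt, g)
  | (r, c) :: rest =>
    if h : r < 0 ∨ rows ≤ r ∨ c < 0 ∨ cols ≤ c ∨ getCell g r c = "#" then
      floodLoop rows cols rest cnt g
    else
      have hlt : nonHash (setCell g r c) < nonHash g := by
        push_neg at h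
        exact nonHash_setCell_lt g r c h.1 h.2.2.1 h.2.2.2.2
      floodLoop rows cols ((r + 1, c) :: (r - 1, c) :: (r, c + 1) :: (r, c - 1) :: rest)
        (cnt + (if getCell g r c = "D" then 1 else 0)) (setCell g r c)
termination_by 5 * nonHash g + stack.length
decreasing_by
  all_goals simp only [List.length_cons]; omega

def dimondCollector_alt (trsr_map : List (List String)) (rows : Int) (cols : Int) : Int :=
  ((PySem.List.pyRange 0 rows 1).foldl (fun st row =>
    (PySem.List.pyRange 0 cols 1).foldl (fun st col =>
      if getCell st.2 row col = "." then
        let p := floodLoop rows cols [(row, col)] 0 st.2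
        (max p.1 st.1, p.2)
      else st) st) ((0 : Int), trsr_map)).1

-- ===== PRECONDITION & SPEC =====
-- Pre_ excludes exactly the inputs where Python A raises IndexError: a positive rows/cols
-- pair exceeding the actual dimensions of trsr_map (rows beyond the list, or a scanned row
-- shorter than cols).
def Pre_dimondCollector (trsr_map : List (List String)) (rows : Int) (cols : Int) : Prop :=
  rows ≤ 0 ∨ cols ≤ 0 ∨
    (rows ≤ (trsr_map.length : Int) ∧ ∀ l ∈ trsr_map.take rows.toNat, cols ≤ (l.length : Int))
instance (trsr_map : List (List String)) (rows : Int) (cols : Int) : Decidable (Pre_dimondCollector trsr_map rows cols) := by unfold Pre_dimondCollector; infer_instance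

def pvWitness_dimondCollector : List (List String) × Int × Int :=
  ([[".", "D", "#"], ["D", ".", "D"]], 2, 3)

def Spec_dimondCollector (trsr_map : List (List String)) (rows : Int) (cols : Int) (out : Int) : Prop := out = dimondCollector_alt trsr_map rows cols
instance (trsr_map : List (List String)) (rows : Int) (cols : Int) (out : Int) : Decidable (Spec_dimondCollector trsr_map rows cols out) := by unfold Spec_dimondCollector; infer_instance

-- ===== CLAIM (what is proved, stated in full; the proofs are below) =====
def Claim_equal_dimondCollector : Prop := ∀ (trsr_map : List (List String)) (rows : Int) (cols : Int), Dom_dimondCollector trsr_map rows cols → Pre_dimondCollector trsr_map rows cols → Spec_dimondCollector trsr_map rows cols (dimondCollector trsr_map rows cols)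

-- ===== LEMMAS AND PROOFS =====

theorem rowCnt_set_le (rw : List String) (j : Nat) :
    rowCnt (rw.set j "#") ≤ rowCnt rw := by
  induction rw generalizing j with
  | nil => simp
  | cons x xs ih =>
    cases j with
    | zero => simp [rowCnt, List.countP_cons]
    | succ k =>
      have := ih k
      simp only [List.set_cons_succ, rowCnt, List.countP_cons] at *
      omega

theorem nonHash_set_le (g : List (List String)) (i : Nat) (r' : List String)
    (h : rowCnt r' ≤ rowCnt (g.getD i [])) :
    nonHash (g.set i r') ≤ nonHash g := by
  induction g generalizing i with
  | nil => simp
  | cons x xs ih =>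
    cases i with
    | zero => simp only [List.getD_cons_zero] at h; simp [nonHash]; omega
    | succ k =>
      have := ih k (by simpa using h)
      simp only [List.set_cons_succ, nonHash, List.map_cons, List.sum_cons] at *
      omega

theorem nonHash_setCell_le (g : List (List String)) (r c : Int) :
    nonHash (setCell g r c) ≤ nonHash g :=
  nonHash_set_le g r.toNat ((g.getD r.toNat []).set c.toNat "#")
    (rowCnt_set_le (g.getD r.toNat []) c.toNat)

-- the flood fill never increases the count of unvisited cells
theorem floodAuxF_mono (f : Nat) : ∀ (row col rows cols : Int) (g : List (List String)),
    nonHash (floodAuxF f row col rows cols g).2 ≤ nonHash g := by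
  induction f with
  | zero => intro row col rows cols g; simp [floodAuxF]
  | succ m ih =>
    intro row col rows cols g
    by_cases h : row < 0 ∨ rows ≤ row ∨ col < 0 ∨ cols ≤ col ∨ getCell g row col = "#"
    · simp [floodAuxF, h]
    · simp only [floodAuxF, if_neg h]
      exact le_trans (ih _ _ _ _ _) (le_trans (ih _ _ _ _ _) (le_trans (ih _ _ _ _ _)
        (le_trans (ih _ _ _ _ _) (nonHash_setCell_le g row col))))

-- one popped cell is processed by the stack loop exactly as one recursive flood fill call
theorem floodLoop_cons (f : Nat) : ∀ (g : List (List String)), nonHash g < f →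
    ∀ (r c rows cols : Int) (rest : List (Int × Int)) (cnt : Int),
    floodLoop rows cols ((r, c) :: rest) cnt g =
      floodLoop rows cols rest (cnt + (floodAuxF f r c rows cols g).1)
        (floodAuxF f r c rows cols g).2 := by
  induction f with
  | zero => intro g hg; omega
  | succ m ih =>
    intro g hg r c rows cols rest cnt
    by_cases h : r < 0 ∨ rows ≤ r ∨ c < 0 ∨ cols ≤ c ∨ getCell g r c = "#"
    · rw [floodLoop]; simp [floodAuxF, h]
    · have hlt : nonHash (setCell g r c) < nonHash g := by
        push_neg at h
        exact nonHash_setCell_lt g r c h.1 h.2.2.1 h.2.2.2.2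
      rw [floodLoop]
      simp only [dif_neg h]
      have hb1 : nonHash (setCell g r c) < m := by omega
      rw [ih (setCell g r c) hb1]
      have hb2 : nonHash (floodAuxF m (r + 1) c rows cols (setCell g r c)).2 < m :=
        Nat.lt_of_le_of_lt (floodAuxF_mono m _ _ _ _ _) hb1
      rw [ih _ hb2]
      have hb3 : nonHash (floodAuxF m (r - 1) c rows cols
          (floodAuxF m (r + 1) c rows cols (setCell g r c)).2).2 < m :=
        Nat.lt_of_le_of_lt (floodAuxF_mono m _ _ _ _ _) hb2
      rw [ih _ hb3]
      have hb4 : nonHash (floodAuxF m r (c + 1) rows cols (floodAuxF m (r - 1) c rows cols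
          (floodAuxF m (r + 1) c rows cols (setCell g r c)).2).2).2 < m :=
        Nat.lt_of_le_of_lt (floodAuxF_mono m _ _ _ _ _) hb3
      rw [ih _ hb4]
      conv_rhs => rw [floodAuxF]
      simp only [if_neg h]
      congr 1
      ring

theorem floodLoop_single (r c rows cols : Int) (g : List (List String)) :
    floodLoop rows cols [(r, c)] 0 g = floodFill r c rows cols g := by
  unfold floodFill
  rw [floodLoop_cons (nonHash g + 1) g (by omega), floodLoop]
  simp

-- ===== VERDICT (by name: the statement is the Claim_ definition above) =====
theorem dimondCollector_spec : Claim_equal_dimondCollector := by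
  intro trsr_map rows cols _ _
  unfold Spec_dimondCollector dimondCollector dimondCollector_alt
  have hfun : (fun (st : Int × List (List String)) (row : Int) =>
      (PySem.List.pyRange 0 cols 1).foldl (fun st col =>
        if getCell st.2 row col = "." then
          let p := floodFill row col rows cols st.2
          (max p.1 st.1, p.2)
        else st) st) =
      (fun (st : Int × List (List String)) (row : Int) =>
      (PySem.List.pyRange 0 cols 1).foldl (fun st col =>
        if getCell st.2 row col = "." then
          let p := floodLoop rows cols [(row, col)] 0 st.2
          (max p.1 st.1, p.2)
        else st) st) := by
    funext st row
    have hstep : (fun (st : Int × List (List String)) (col : Int) =>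
        if getCell st.2 row col = "." then
          let p := floodFill row col rows cols st.2
          (max p.1 st.1, p.2)
        else st) =
        (fun (st : Int × List (List String)) (col : Int) =>
        if getCell st.2 row col = "." then
          let p := floodLoop rows cols [(row, col)] 0 st.2
          (max p.1 st.1, p.2)
        else st) := by
      funext st col
      by_cases hdot : getCell st.2 row col = "."
      · simp only [hdot, if_true, floodLoop_single]
      · simp [hdot]
    rw [hstep]
  rw [hfun]
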